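-- pv_equiv track=rewrite | github.com/firdausi555/leetCode-questions | 1813.py | areSentencesSimilar
-- ===== SOURCE A (Python) =====
-- def areSentencesSimilar(sentence1: str, sentence2: str) -> bool:
--     st1=sentence1.split(" ")
--     st2=sentence2.split(" ")
--
--     if len(st1)>len(st2):
--         st1,st2=st2,st1
--
--     #to check and compare prefix
--     i=0
--     while i <len(st1) and st1[i]==st2[i]:
--         i+=1
--
--     #to check and compare suffix
--     j=0
--     while j<len(st1) and st1[-(j+1)] ==st2[-(j+1)]:
--         j+=1
--
--     return i+j >=len(st1)
-- ===== SOURCE B (Python) =====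
-- def areSentencesSimilar(sentence1: str, sentence2: str) -> bool:
--     s1 = sentence1.split(" ")
--     s2 = sentence2.split(" ")
--     if len(s1) > len(s2):
--         s1, s2 = s2, s1
--     d = len(s2) - len(s1)
--     return any(s1[:k] == s2[:k] and s1[k:] == s2[k + d:]
--                for k in range(len(s1) + 1))
-- ===== Notes on version B (the rewrite author's own statement) =====
-- stated objective: alternative
-- what changed: Replaces A's two independent while-loops counting the common prefix and common suffix by a single enumerate-and-verify pass that tests, for each split point k, whether the shorter word list equals the longer one with a contiguous middle block deleted.
import Mathlib
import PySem

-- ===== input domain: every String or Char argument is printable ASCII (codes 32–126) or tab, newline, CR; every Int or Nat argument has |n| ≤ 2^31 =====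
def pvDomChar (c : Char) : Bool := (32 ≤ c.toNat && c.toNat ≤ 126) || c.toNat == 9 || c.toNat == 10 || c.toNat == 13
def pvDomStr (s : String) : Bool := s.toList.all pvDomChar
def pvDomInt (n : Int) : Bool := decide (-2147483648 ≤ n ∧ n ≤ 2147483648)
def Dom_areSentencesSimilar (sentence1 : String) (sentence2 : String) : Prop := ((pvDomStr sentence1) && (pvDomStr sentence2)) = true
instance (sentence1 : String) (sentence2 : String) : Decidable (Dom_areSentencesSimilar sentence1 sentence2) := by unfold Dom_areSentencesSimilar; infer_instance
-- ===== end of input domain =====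

-- B replaces A's two independent prefix/suffix counting loops by a single enumerate-and-verify
-- pass over split points (alternative decomposition; same return value everywhere).

-- ===== PORT A =====
-- while i < len(st1) and st1[i] == st2[i]: i += 1
def aPrefLoop (st1 st2 : List String) (i : Nat) : Nat :=
  if h : i < st1.length ∧ PySem.List.pyGet? st1 (i : Int) = PySem.List.pyGet? st2 (i : Int) then
    aPrefLoop st1 st2 (i + 1)
  else i
termination_by st1.length - i
decreasing_by omega

-- while j < len(st1) and st1[-(j+1)] == st2[-(j+1)]: j += 1
def aSufLoop (st1 st2 : List String) (j : Nat) : Nat :=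
  if h : j < st1.length ∧ PySem.List.pyGet? st1 (-((j : Int) + 1)) = PySem.List.pyGet? st2 (-((j : Int) + 1)) then
    aSufLoop st1 st2 (j + 1)
  else j
termination_by st1.length - j
decreasing_by omega

def areSentencesSimilar (sentence1 : String) (sentence2 : String) : Bool :=
  let st1 := (PySem.Str.split? sentence1 " ").getD []
  let st2 := (PySem.Str.split? sentence2 " ").getD []
  let p := if st1.length > st2.length then (st2, st1) else (st1, st2)
  let i := aPrefLoop p.1 p.2 0
  let j := aSufLoop p.1 p.2 0
  decide (p.1.length ≤ i + j)

-- ===== PORT B =====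
-- any(s1[:k] == s2[:k] and s1[k:] == s2[k+d:] for k in range(len(s1)+1))
def bAny (s1 s2 : List String) : Bool :=
  let d := s2.length - s1.length
  (List.range (s1.length + 1)).any fun k =>
    (PySem.List.slice s1 none (some (k : Int)) == PySem.List.slice s2 none (some (k : Int))) &&
    (PySem.List.slice s1 (some (k : Int)) none == PySem.List.slice s2 (some ((k + d : Nat) : Int)) none)

def areSentencesSimilar_alt (sentence1 : String) (sentence2 : String) : Bool :=
  let s1 := (PySem.Str.split? sentence1 " ").getD []
  let s2 := (PySem.Str.split? sentence2 " ").getD []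
  let p := if s1.length > s2.length then (s2, s1) else (s1, s2)
  bAny p.1 p.2

-- ===== PRECONDITION & SPEC =====
def Spec_areSentencesSimilar (sentence1 : String) (sentence2 : String) (out : Bool) : Prop := out = areSentencesSimilar_alt sentence1 sentence2
instance (sentence1 : String) (sentence2 : String) (out : Bool) : Decidable (Spec_areSentencesSimilar sentence1 sentence2 out) := by unfold Spec_areSentencesSimilar; infer_instance

-- ===== CLAIM (what is proved, stated in full; the proofs are below) =====
def Claim_equal_areSentencesSimilar : Prop := ∀ (sentence1 : String) (sentence2 : String), Dom_areSentencesSimilar sentence1 sentence2 → Spec_areSentencesSimilar sentence1 sentence2 (areSentencesSimilar sentence1 sentence2)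

-- ===== LEMMAS AND PROOFS =====

/-- common-prefix length of two lists -/
def cpl : List String → List String → Nat
  | a :: as, b :: bs => if a = b then cpl as bs + 1 else 0
  | _, _ => 0

theorem cpl_nil_right (a : List String) : cpl a [] = 0 := by cases a <;> rfl

theorem take_eq_of_le_cpl : ∀ (a b : List String) (k : Nat), k ≤ cpl a b → a.take k = b.take k
  | _, _, 0, _ => by simp
  | a :: as, b :: bs, k + 1, h => by
    by_cases hab : a = b
    · simp only [cpl, if_pos hab] at h
      simp [List.take_succ_cons, hab, take_eq_of_le_cpl as bs k (by omega)]
    · simp [cpl, hab] at h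
  | [], b, k + 1, h => by simp [cpl] at h
  | a :: as, [], k + 1, h => by simp [cpl_nil_right] at h

theorem le_cpl_of_take_eq : ∀ (a b : List String) (k : Nat), k ≤ a.length → a.take k = b.take k → k ≤ cpl a b
  | _, _, 0, _, _ => by omega
  | a :: as, b :: bs, k + 1, hk, he => by
    simp only [List.take_succ_cons, List.cons.injEq] at he
    simp only [cpl, if_pos he.1]
    have := le_cpl_of_take_eq as bs k (by simpa using hk) he.2
    omega
  | [], b, k + 1, hk, _ => by simp at hk
  | a :: as, [], k + 1, hk, he => by simp at he

theorem pyGet?_negSucc (l : List String) (j : Nat) :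
    PySem.List.pyGet? l (-((j : Int) + 1)) = l.reverse[j]? := by
  by_cases h : j < l.length
  · have e : (-((j : Int) + 1)) = -(((j + 1 : Nat) : Int)) := by push_cast; ring
    rw [e, PySem.List.pyGet?_neg_natCast l (j+1) (by omega) (by omega), List.getElem?_reverse h]
    congr 1; omega
  · rw [List.getElem?_eq_none (by simpa using by omega)]
    rw [PySem.List.pyGet?_eq_none_iff]
    simp only [PySem.Raise.InRange]
    omega

theorem prefLoop_eq (a b : List String) (i : Nat) :
    aPrefLoop a b i = i + cpl (a.drop i) (b.drop i) := by
  rw [aPrefLoop]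
  split
  · rename_i h
    obtain ⟨hi, he⟩ := h
    rw [prefLoop_eq a b (i + 1)]
    simp only [PySem.List.pyGet?_natCast] at he
    have hb : i < b.length := by
      have hs : b[i]? = some a[i] := by rw [← he, List.getElem?_eq_getElem hi]
      exact (List.getElem?_eq_some_iff.mp hs).1
    have heq : a[i] = b[i] := by
      rw [List.getElem?_eq_getElem hi, List.getElem?_eq_getElem hb] at he
      exact Option.some.inj he
    rw [List.drop_eq_getElem_cons hi, List.drop_eq_getElem_cons hb]
    simp only [cpl, if_pos heq]
    omega
  · rename_i h
    push Not at h
    by_cases hi : i < a.length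
    · have he := h hi
      simp only [PySem.List.pyGet?_natCast] at he
      by_cases hb : i < b.length
      · rw [List.drop_eq_getElem_cons hi, List.drop_eq_getElem_cons hb]
        have : a[i] ≠ b[i] := by
          intro hc
          exact he (by rw [List.getElem?_eq_getElem hi, List.getElem?_eq_getElem hb, hc])
        simp only [cpl, if_neg this]
        omega
      · rw [show List.drop i b = [] from List.drop_eq_nil_of_le (by omega), cpl_nil_right]
        omega
    · rw [show List.drop i a = [] from List.drop_eq_nil_of_le (by omega)]
      simp [cpl]
termination_by a.length - i
decreasing_by omega

theorem sufLoop_eq (a b : List String) (j : Nat) :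
    aSufLoop a b j = j + cpl (a.reverse.drop j) (b.reverse.drop j) := by
  rw [aSufLoop]
  split
  · rename_i h
    obtain ⟨hj, he⟩ := h
    rw [sufLoop_eq a b (j + 1)]
    rw [pyGet?_negSucc a j, pyGet?_negSucc b j] at he
    have hja : j < a.reverse.length := by simpa using hj
    have hb : j < b.reverse.length := by
      have hs : b.reverse[j]? = some a.reverse[j] := by rw [← he, List.getElem?_eq_getElem hja]
      exact (List.getElem?_eq_some_iff.mp hs).1
    have heq : a.reverse[j] = b.reverse[j] := by
      rw [List.getElem?_eq_getElem hja, List.getElem?_eq_getElem hb] at he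
      exact Option.some.inj he
    rw [List.drop_eq_getElem_cons hja, List.drop_eq_getElem_cons hb]
    simp only [cpl, if_pos heq]
    omega
  · rename_i h
    push Not at h
    by_cases hj : j < a.length
    · have he := h hj
      rw [pyGet?_negSucc a j, pyGet?_negSucc b j] at he
      have hja : j < a.reverse.length := by simpa using hj
      by_cases hb : j < b.reverse.length
      · rw [List.drop_eq_getElem_cons hja, List.drop_eq_getElem_cons hb]
        have : a.reverse[j] ≠ b.reverse[j] := by
          intro hc
          exact he (by rw [List.getElem?_eq_getElem hja, List.getElem?_eq_getElem hb, hc])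
        simp only [cpl, if_neg this]
        omega
      · rw [show List.drop j b.reverse = [] from List.drop_eq_nil_of_le (by omega), cpl_nil_right]
        omega
    · rw [show List.drop j a.reverse = [] from List.drop_eq_nil_of_le (by simp; omega)]
      simp [cpl]
termination_by a.length - j
decreasing_by omega

theorem core_eq (a b : List String) (h : a.length ≤ b.length) :
    decide (a.length ≤ aPrefLoop a b 0 + aSufLoop a b 0) = bAny a b := by
  rw [prefLoop_eq, sufLoop_eq]
  simp only [List.drop_zero, Nat.zero_add]
  unfold bAny
  simp only [PySem.List.slice_to_natCast, PySem.List.slice_from_natCast]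
  set n := a.length with hn
  set m := b.length with hm
  set P := cpl a b with hP
  set S := cpl a.reverse b.reverse with hS
  have key : (n ≤ P + S) ↔
      ∃ k, k < n + 1 ∧ a.take k = b.take k ∧ a.drop k = b.drop (k + (m - n)) := by
    constructor
    · intro hps
      refine ⟨n - min S n, by omega, ?_, ?_⟩
      · exact take_eq_of_le_cpl a b _ (by omega)
      · have ht : a.reverse.take (min S n) = b.reverse.take (min S n) :=
          take_eq_of_le_cpl a.reverse b.reverse _ (by omega)
        rw [← List.reverse_inj, List.reverse_drop, List.reverse_drop]
        rw [show n - (n - min S n) = min S n by omega] at *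
        rw [show m - (n - min S n + (m - n)) = min S n by omega]
        exact ht
    · rintro ⟨k, hk, htake, hdrop⟩
      have hkP : k ≤ P := le_cpl_of_take_eq a b k (by omega) htake
      have hkS : n - k ≤ S := by
        apply le_cpl_of_take_eq a.reverse b.reverse (n - k) (by simpa using by omega)
        have := congrArg List.reverse hdrop
        rw [List.reverse_drop, List.reverse_drop] at this
        rw [show m - (k + (m - n)) = n - k by omega] at this
        exact this
      omega
  rw [Bool.eq_iff_iff]
  simp only [decide_eq_true_eq, List.any_eq_true, List.mem_range, Bool.and_eq_true, beq_iff_eq]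
  rw [key]

-- ===== VERDICT (by name: the statement is the Claim_ definition above) =====
theorem areSentencesSimilar_spec : Claim_equal_areSentencesSimilar := by
  intro s1 s2 _
  unfold Spec_areSentencesSimilar areSentencesSimilar areSentencesSimilar_alt
  set a := (PySem.Str.split? s1 " ").getD [] with ha
  set b := (PySem.Str.split? s2 " ").getD [] with hb
  by_cases hlen : a.length > b.length
  · simp only [if_pos hlen]
    exact core_eq b a (by omega)
  · simp only [if_neg hlen]
    exact core_eq a b (by omega)
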